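-- pv_equiv track=rewrite | github.com/enochadane/Competitive-Programming | contests/Number of rectangles that can form the largest square.py | countGoodRectangles
-- ===== SOURCE A (Python) =====
-- from typing import List
--
-- def countGoodRectangles(rectangles: List[List[int]]) -> int:
--     counter = 0
--     maxLen = 0
--     for rect in rectangles:
--         localMax = min(rect[0], rect[1])
--         if localMax > maxLen:
--             maxLen = localMax
--
--     for l, w in rectangles:
--         if min(l, w) == maxLen:
--             counter += 1
--
--     return counter
-- ===== SOURCE B (Python) =====
-- from typing import List
--
-- def countGoodRectangles(rectangles: List[List[int]]) -> int:
--     maxLen = 0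
--     count = 0
--     for l, w in rectangles:
--         m = min(l, w)
--         if m > maxLen:
--             maxLen = m
--             count = 1
--         elif m == maxLen:
--             count += 1
--     return count
-- ===== Notes on version B (the rewrite author's own statement) =====
-- stated objective: faster
-- what changed: Fuses A's two passes (find max min-side, then re-scan to count it) into a single pass that tracks the running maximum and its tally together.
import Mathlib
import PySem

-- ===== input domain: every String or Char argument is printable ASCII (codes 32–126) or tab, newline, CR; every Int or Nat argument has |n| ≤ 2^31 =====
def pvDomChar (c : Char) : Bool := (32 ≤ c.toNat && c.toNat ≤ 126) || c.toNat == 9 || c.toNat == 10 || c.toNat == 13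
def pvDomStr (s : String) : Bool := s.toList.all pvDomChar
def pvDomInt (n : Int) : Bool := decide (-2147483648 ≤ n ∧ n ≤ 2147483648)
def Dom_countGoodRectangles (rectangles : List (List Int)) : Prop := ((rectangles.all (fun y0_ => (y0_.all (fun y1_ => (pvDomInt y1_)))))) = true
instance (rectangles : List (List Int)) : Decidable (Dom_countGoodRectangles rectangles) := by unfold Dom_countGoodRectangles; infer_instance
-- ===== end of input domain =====

-- B fuses A's two passes into one, tracking the running max min-side and its tally together.


-- ===== PORT A =====
-- first loop: localMax = min(rect[0], rect[1]); if localMax > maxLen: maxLen = localMax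
def aStepMax (m : Int) (rect : List Int) : Int :=
  match PySem.List.pyGet? rect 0, PySem.List.pyGet? rect 1 with
  | some a, some b => if min a b > m then min a b else m
  | _, _ => m  -- Python raises IndexError here; excluded by Pre_

-- second loop: unpack 'for l, w in rectangles'; if min(l, w) == maxLen: counter += 1
def aStepCnt (maxLen : Int) (c : Int) (rect : List Int) : Int :=
  match rect with
  | [l, w] => if min l w = maxLen then c + 1 else c
  | _ => c  -- Python raises ValueError (unpacking) here; excluded by Pre_

def countGoodRectangles (rectangles : List (List Int)) : Int :=
  let maxLen := rectangles.foldl aStepMax 0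
  rectangles.foldl (aStepCnt maxLen) 0

-- ===== PORT B =====
-- single pass: state (maxLen, count)
def bStep (s : Int × Int) (rect : List Int) : Int × Int :=
  match rect with
  | [l, w] =>
    let m := min l w
    if m > s.1 then (m, 1)
    else if m = s.1 then (s.1, s.2 + 1)
    else s
  | _ => s  -- Python raises ValueError (unpacking) here; excluded by Pre_

def countGoodRectangles_alt (rectangles : List (List Int)) : Int :=
  (rectangles.foldl bStep (0, 0)).2

-- ===== PRECONDITION & SPEC =====
-- A raises (IndexError on rect[1] / ValueError on unpacking) unless every rectangle has exactly two entries.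
def Pre_countGoodRectangles (rectangles : List (List Int)) : Prop :=
  ∀ r ∈ rectangles, r.length = 2
instance (rectangles : List (List Int)) : Decidable (Pre_countGoodRectangles rectangles) := by
  unfold Pre_countGoodRectangles; infer_instance

def pvWitness_countGoodRectangles : List (List Int) := [[5, 8], [3, 9], [5, 12], [16, 5]]

def Spec_countGoodRectangles (rectangles : List (List Int)) (out : Int) : Prop := out = countGoodRectangles_alt rectangles
instance (rectangles : List (List Int)) (out : Int) : Decidable (Spec_countGoodRectangles rectangles out) := by unfold Spec_countGoodRectangles; infer_instance

-- ===== CLAIM (what is proved, stated in full; the proofs are below) =====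
def Claim_equal_countGoodRectangles : Prop := ∀ (rectangles : List (List Int)), Dom_countGoodRectangles rectangles → Pre_countGoodRectangles rectangles → Spec_countGoodRectangles rectangles (countGoodRectangles rectangles)

-- ===== LEMMAS AND PROOFS =====

-- min-side of a rectangle (proof-side helper)
def minRect (r : List Int) : Int :=
  match r with
  | [l, w] => min l w
  | _ => 0

-- running maximum over a list of min-sides
def fmaxA (ms : List Int) (M : Int) : Int :=
  ms.foldl (fun m x => if x > m then x else m) M

-- number of occurrences of M in ms
def countEq : List Int → Int → Int
  | [], _ => 0
  | x :: xs, M => (if x = M then 1 else 0) + countEq xs M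

theorem fmaxA_cons (x : Int) (xs : List Int) (M : Int) :
    fmaxA (x :: xs) M = fmaxA xs (if x > M then x else M) := rfl

theorem aStepMax_pair (M a b : Int) :
    aStepMax M [a, b] = if min a b > M then min a b else M := by
  simp [aStepMax, PySem.List.pyGet?, PySem.List.pyIdx?]

theorem le_fmaxA : ∀ (ms : List Int) (M : Int), M ≤ fmaxA ms M := by
  intro ms
  induction ms with
  | nil => intro M; simp [fmaxA]
  | cons x xs ih =>
    intro M
    have h := ih (if x > M then x else M)
    rw [fmaxA_cons]
    split_ifs at h ⊢ <;> omega

theorem maxA_eq : ∀ (rs : List (List Int)) (M : Int),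
    (∀ r ∈ rs, r.length = 2) →
    rs.foldl aStepMax M = fmaxA (rs.map minRect) M := by
  intro rs
  induction rs with
  | nil => intro M _; simp [fmaxA]
  | cons r rs ih =>
    intro M h
    obtain ⟨a, b, rfl⟩ : ∃ a b, r = [a, b] := by
      match r, h r (by simp) with
      | [a, b], _ => exact ⟨a, b, rfl⟩
    have h' : ∀ r ∈ rs, r.length = 2 := fun r hr => h r (by simp [hr])
    simp only [List.foldl_cons, List.map_cons, minRect, fmaxA_cons, aStepMax_pair]
    exact ih _ h'

theorem cntA_eq : ∀ (rs : List (List Int)) (M c : Int),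
    (∀ r ∈ rs, r.length = 2) →
    rs.foldl (aStepCnt M) c = c + countEq (rs.map minRect) M := by
  intro rs
  induction rs with
  | nil => intro M c _; simp [countEq]
  | cons r rs ih =>
    intro M c h
    obtain ⟨a, b, rfl⟩ : ∃ a b, r = [a, b] := by
      match r, h r (by simp) with
      | [a, b], _ => exact ⟨a, b, rfl⟩
    have h' : ∀ r ∈ rs, r.length = 2 := fun r hr => h r (by simp [hr])
    simp only [List.foldl_cons, List.map_cons, minRect, aStepCnt, countEq]
    split_ifs <;> rw [ih _ _ h'] <;> omega

theorem bFold_eq : ∀ (rs : List (List Int)) (M c : Int),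
    (∀ r ∈ rs, r.length = 2) →
    rs.foldl bStep (M, c) =
      (fmaxA (rs.map minRect) M,
       countEq (rs.map minRect) (fmaxA (rs.map minRect) M) +
         if fmaxA (rs.map minRect) M = M then c else 0) := by
  intro rs
  induction rs with
  | nil => intro M c _; simp [fmaxA, countEq]
  | cons r rs ih =>
    intro M c h
    obtain ⟨a, b, rfl⟩ : ∃ a b, r = [a, b] := by
      match r, h r (by simp) with
      | [a, b], _ => exact ⟨a, b, rfl⟩
    have h' : ∀ r ∈ rs, r.length = 2 := fun r hr => h r (by simp [hr])
    simp only [List.foldl_cons, List.map_cons, minRect, bStep, fmaxA_cons, countEq]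
    by_cases h1 : min a b > M
    · simp only [if_pos h1]
      rw [ih _ _ h']
      have hge := le_fmaxA (rs.map minRect) (min a b)
      simp only [Prod.mk.injEq]
      exact ⟨trivial, by split_ifs <;> omega⟩
    · simp only [if_neg h1]
      have hge := le_fmaxA (rs.map minRect) M
      by_cases h2 : min a b = M
      · simp only [if_pos h2]
        rw [ih _ _ h']
        simp only [Prod.mk.injEq]
        exact ⟨trivial, by split_ifs <;> omega⟩
      · simp only [if_neg h2]
        rw [ih _ _ h']
        simp only [Prod.mk.injEq]
        exact ⟨trivial, by split_ifs <;> omega⟩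

-- ===== VERDICT (by name: the statement is the Claim_ definition above) =====
theorem countGoodRectangles_spec : Claim_equal_countGoodRectangles := by
  intro rs _ hpre
  unfold Spec_countGoodRectangles countGoodRectangles countGoodRectangles_alt
  rw [maxA_eq rs 0 hpre, cntA_eq rs _ 0 hpre, bFold_eq rs 0 0 hpre]
  split_ifs <;> omega
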